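-- pv_equiv track=rewrite | github.com/DUPUISMax/SAE_donn-es | analyse/module.py | chargetotal
-- ===== SOURCE A (Python) =====
-- def chargetotal(data):
--     parkingstot = {}
--     for entry in data:
--         for parking_name, parking_info in entry.items():
--             if parking_name not in parkingstot:
--                 parkingstot[parking_name] = []
--             parkingstot[parking_name].append(parking_info['placetotal'])
--     return parkingstot
-- ===== SOURCE B (Python) =====
-- def chargetotal(data):
--     # Two-phase plan: dedup the parking names in first-occurrence order,
--     # then build each name's value list by an independent filtered scan.
--     names = list(dict.fromkeys(n for entry in data for n in entry))
--     return {name: [info['placetotal']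
--                    for entry in data
--                    for n, info in entry.items() if n == name]
--             for name in names}
-- ===== Notes on version B (the rewrite author's own statement) =====
-- stated objective: alternative
-- what changed: B replaces A's single accumulating-dict pass by a two-phase plan: first dedup the parking names in first-occurrence order, then build each name's value list by an independent filtered comprehension over the whole data.
import Mathlib
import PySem

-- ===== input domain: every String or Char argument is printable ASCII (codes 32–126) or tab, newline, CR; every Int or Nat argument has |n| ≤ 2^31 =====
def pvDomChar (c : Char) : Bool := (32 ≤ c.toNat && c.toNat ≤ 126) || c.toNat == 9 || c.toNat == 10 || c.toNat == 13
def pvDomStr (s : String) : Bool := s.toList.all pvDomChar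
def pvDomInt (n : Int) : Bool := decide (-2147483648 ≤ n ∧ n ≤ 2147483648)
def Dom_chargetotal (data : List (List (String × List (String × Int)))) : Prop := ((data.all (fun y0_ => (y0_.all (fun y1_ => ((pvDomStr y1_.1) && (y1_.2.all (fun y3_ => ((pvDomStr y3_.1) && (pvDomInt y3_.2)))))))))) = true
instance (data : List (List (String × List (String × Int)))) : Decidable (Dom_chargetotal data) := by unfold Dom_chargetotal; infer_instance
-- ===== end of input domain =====

-- B groups the counts by a different decomposition (dedup the names first, then one independent
-- filtered scan per name) instead of A's single accumulating-dict pass; same return value on Pre_.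

-- ===== PORT A =====
-- A: one pass over the data, growing a dict: `if name not in d: d[name] = []` then d[name].append(…).
def chargetotal (data : List (List (String × List (String × Int)))) : List (String × List Int) :=
  (data.foldl
    (fun parkingstot entry =>
      entry.foldl
        (fun d p =>
          let d' := if d.contains p.1 then d else d.insert p.1 ([] : List Int)
          d'.modify p.1 [] (fun l => l ++ [(PySem.Dict.mk p.2).getD "placetotal" 0]))
        parkingstot)
    PySem.Dict.empty).items

-- ===== PORT B =====
-- B: names := list(dict.fromkeys(…)), then a per-name filtered comprehension over the whole data.
def chargetotal_alt (data : List (List (String × List (String × Int)))) : List (String × List Int) :=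
  let names := PySem.List.dedup (data.flatMap (fun entry => entry.map Prod.fst))
  names.map (fun name =>
    (name,
      data.flatMap (fun entry =>
        (entry.filter (fun p => p.1 == name)).map
          (fun p => (PySem.Dict.mk p.2).getD "placetotal" 0))))

-- ===== PRECONDITION & SPEC =====
-- Pre_ excludes inputs where some parking_info lacks the key "placetotal" (Python A raises
-- KeyError there, and B raises too) and association lists with duplicate keys, which no Python
-- dict can represent, so neither program is ever run on them.
def Pre_chargetotal (data : List (List (String × List (String × Int)))) : Prop :=
  ∀ entry ∈ data, (entry.map Prod.fst).Nodup ∧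
    ∀ p ∈ entry, (p.2.map Prod.fst).Nodup ∧ "placetotal" ∈ p.2.map Prod.fst
instance (data : List (List (String × List (String × Int)))) : Decidable (Pre_chargetotal data) := by
  unfold Pre_chargetotal; infer_instance

def pvWitness_chargetotal : (List (List (String × List (String × Int)))) :=
  [[("a", [("placetotal", 3)])], [("a", [("placetotal", 5)]), ("b", [("placetotal", 7)])]]

def Spec_chargetotal (data : List (List (String × List (String × Int)))) (out : List (String × List Int)) : Prop := out = chargetotal_alt data
instance (data : List (List (String × List (String × Int)))) (out : List (String × List Int)) : Decidable (Spec_chargetotal data out) := by unfold Spec_chargetotal; infer_instance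

-- ===== CLAIM (what is proved, stated in full; the proofs are below) =====
def Claim_equal_chargetotal : Prop := ∀ (data : List (List (String × List (String × Int)))), Dom_chargetotal data → Pre_chargetotal data → Spec_chargetotal data (chargetotal data)

-- ===== LEMMAS AND PROOFS =====

-- the inner-dict lookup parking_info['placetotal'] both ports perform
def pvVal (p : String × List (String × Int)) : Int := (PySem.Dict.mk p.2).getD "placetotal" 0

-- A's guarded insert-then-append step is one `modify` with default [].
theorem step_eq (d : PySem.Dict String (List Int)) (k : String) (v : Int) :
    (if d.contains k then d else d.insert k ([] : List Int)).modify k [] (fun l => l ++ [v])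
      = d.modify k [] (fun l => l ++ [v]) := by
  by_cases h : d.contains k
  · simp [h]
  · simp only [h, Bool.false_eq_true, if_false, PySem.Dict.modify,
      PySem.Dict.getD_insert_self, PySem.Dict.insert_insert_self, List.nil_append,
      PySem.Dict.getD_of_not_contains d ([] : List Int) (by simpa using h)]

-- A's fold, flattened to one pass and normalised to a pure modify-append loop, produces exactly
-- B's per-name grouping (keys in first-occurrence order, values in data order).
theorem chargetotal_main (data : List (List (String × List (String × Int)))) :
    (data.foldl
      (fun parkingstot entry =>
        entry.foldl
          (fun d p =>
            let d' := if d.contains p.1 then d else d.insert p.1 ([] : List Int)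
            d'.modify p.1 [] (fun l => l ++ [pvVal p]))
          parkingstot)
      PySem.Dict.empty).items
    = (PySem.List.dedup (data.flatMap (fun entry => entry.map Prod.fst))).map (fun name =>
        (name,
          data.flatMap (fun entry =>
            (entry.filter (fun p => p.1 == name)).map pvVal))) := by
  rw [← List.foldl_flatten]
  set ps := data.flatten with hps
  have hstep : (fun (d : PySem.Dict String (List Int)) (p : String × List (String × Int)) =>
      (if d.contains p.1 then d else d.insert p.1 ([] : List Int)).modify p.1 [] (fun l => l ++ [pvVal p]))
      = fun d p => d.modify p.1 [] (fun l => l ++ [pvVal p]) := by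
    funext d p; exact step_eq d p.1 (pvVal p)
  simp only [hstep]
  have hmap : ps.foldl (fun d p => d.modify p.1 [] (fun l => l ++ [pvVal p])) PySem.Dict.empty
      = (ps.map (fun p => (p.1, pvVal p))).foldl
          (fun d (r : String × Int) => d.modify r.1 [] (fun l => l ++ [r.2])) PySem.Dict.empty := by
    rw [List.foldl_map]
  rw [hmap]
  set q := ps.map (fun p => (p.1, pvVal p)) with hq
  set D := q.foldl (fun d (r : String × Int) => d.modify r.1 [] (fun l => l ++ [r.2])) PySem.Dict.empty with hD
  have hnd : D.keys.Nodup := by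
    apply PySem.Dict.nodup_keys_foldl_modify_key q Prod.fst [] (fun _ r l => l ++ [r.2])
    simp [PySem.Dict.keys_empty]
  have hk : D.keys = PySem.Set.ofList (ps.map Prod.fst) := by
    rw [hD, PySem.Dict.keys_foldl_modify_key q Prod.fst [] (fun _ r l => l ++ [r.2])]
    simp [PySem.Dict.keys_empty, PySem.Set.update_nil_left, hq, List.map_map, Function.comp_def]
  have hg : ∀ c, D.getD c [] = (ps.filter (fun p => p.1 == c)).map pvVal := by
    intro c
    rw [hD, PySem.Dict.getD_foldl_modify_append q PySem.Dict.empty c]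
    simp [hq, List.filter_map, Function.comp_def]
  rw [PySem.Dict.items_eq_map_keys D hnd []]
  have hnames : PySem.List.dedup (data.flatMap (fun entry => entry.map Prod.fst))
      = PySem.Set.ofList (ps.map Prod.fst) := by
    simp [PySem.List.dedup_eq_ofList, List.flatMap_def, hps, List.map_flatten]
  rw [hnames, hk]
  apply List.map_congr_left
  intro c _
  rw [hg c]
  simp [List.flatMap_def, hps, List.filter_flatten, List.map_flatten, List.map_map, Function.comp_def]

-- ===== VERDICT (by name: the statement is the Claim_ definition above) =====
theorem chargetotal_spec : Claim_equal_chargetotal := by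
  intro data _ _
  unfold Spec_chargetotal chargetotal chargetotal_alt
  exact chargetotal_main data
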